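-- pv_equiv track=rewrite | github.com/JasperMeersschaut/Python-Dodona | Python 6 Dictionaries en Sets/dubbels.py | dubbels
-- ===== SOURCE A (Python) =====
-- def dubbels(lijst):
--     dictionary = {}
--     eenmaalSet = set()
--     meermaalSet = set()
--     for karakter in lijst:
--         if karakter in dictionary:
--             meermaalSet.add(karakter)
--             eenmaalSet.discard(karakter)
--         else:
--             dictionary[karakter] = 1
--             eenmaalSet.add(karakter)
--     return (eenmaalSet, meermaalSet)
-- ===== SOURCE B (Python) =====
-- def dubbels(lijst):
--     herhalingen = [x for i, x in enumerate(lijst) if x in lijst[:i]]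
--     meermaalSet = set(herhalingen)
--     eenmaalSet = {x for x in dict.fromkeys(lijst) if x not in meermaalSet}
--     return (eenmaalSet, meermaalSet)
-- ===== Notes on version B (the rewrite author's own statement) =====
-- stated objective: alternative
-- what changed: Instead of one loop maintaining a seen-dict and two live sets via add/discard, B collects the repeat occurrences with a slice-membership comprehension and then derives both sets afterwards (set of repeats; one-occurrence elements filtered against it).
import Mathlib
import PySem

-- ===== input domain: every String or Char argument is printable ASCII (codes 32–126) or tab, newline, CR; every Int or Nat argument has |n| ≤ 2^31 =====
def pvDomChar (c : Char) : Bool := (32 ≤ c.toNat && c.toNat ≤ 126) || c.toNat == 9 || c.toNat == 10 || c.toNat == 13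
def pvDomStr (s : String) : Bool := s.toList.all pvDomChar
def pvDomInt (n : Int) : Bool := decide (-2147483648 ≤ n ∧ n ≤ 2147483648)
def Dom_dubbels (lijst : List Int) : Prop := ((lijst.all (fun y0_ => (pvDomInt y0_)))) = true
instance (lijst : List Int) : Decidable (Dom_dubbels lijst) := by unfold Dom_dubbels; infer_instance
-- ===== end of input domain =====

-- B replaces A's single loop maintaining two live sets with add/discard by a comprehension
-- collecting the repeat occurrences and two derived set builders (alternative decomposition, not faster).

-- ===== PORT A =====
-- loop body of A: dict membership test, then set add/discard on the two live sets
def pvStepA (st : PySem.Dict Int Int × PySem.Set Int × PySem.Set Int) (karakter : Int) :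
    PySem.Dict Int Int × PySem.Set Int × PySem.Set Int :=
  if st.1.contains karakter then
    (st.1, PySem.Set.discard st.2.1 karakter, PySem.Set.add st.2.2 karakter)
  else
    (st.1.insert karakter 1, PySem.Set.add st.2.1 karakter, st.2.2)

def dubbels (lijst : List Int) : List Int × List Int :=
  let st := lijst.foldl pvStepA (PySem.Dict.empty, PySem.Set.empty, PySem.Set.empty)
  (st.2.1, st.2.2)

-- ===== PORT B =====
-- [x for i, x in enumerate(lijst) if x in lijst[:i]]
def pvReps (lijst : List Int) : List Int :=
  ((PySem.List.enumerate lijst 0).filter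
      (fun p => decide (p.2 ∈ PySem.List.slice lijst none (some p.1)))).map (·.2)

def dubbels_alt (lijst : List Int) : List Int × List Int :=
  let herhalingen := pvReps lijst
  let meermaalSet : PySem.Set Int := PySem.Set.ofList herhalingen
  let eenmaalSet : PySem.Set Int := PySem.Set.ofList
      ((PySem.List.dedup lijst).filter (fun x => !(PySem.Set.contains meermaalSet x)))
  (eenmaalSet, meermaalSet)

-- ===== PRECONDITION & SPEC =====
def Spec_dubbels (lijst : List Int) (out : List Int × List Int) : Prop := out = dubbels_alt lijst
instance (lijst : List Int) (out : List Int × List Int) : Decidable (Spec_dubbels lijst out) := by unfold Spec_dubbels; infer_instance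

-- ===== CLAIM (what is proved, stated in full; the proofs are below) =====
def Claim_equal_dubbels : Prop := ∀ (lijst : List Int), Dom_dubbels lijst → Spec_dubbels lijst (dubbels lijst)

-- ===== LEMMAS AND PROOFS =====

-- the dict component of A's loop, on its own
def pvDictFor (l : List Int) : PySem.Dict Int Int :=
  l.foldl (fun d k => if d.contains k then d else d.insert k 1) PySem.Dict.empty

lemma pvDictFor_append (l : List Int) (k : Int) :
    pvDictFor (l ++ [k]) =
      if (pvDictFor l).contains k then pvDictFor l else (pvDictFor l).insert k 1 := by
  simp [pvDictFor, List.foldl_append]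

lemma contains_pvDictFor (l : List Int) : ∀ (k : Int),
    (pvDictFor l).contains k = decide (k ∈ l) := by
  induction l using List.reverseRecOn with
  | nil => intro k; simp [pvDictFor]
  | append_singleton l x ih =>
      intro k
      rw [pvDictFor_append]
      by_cases hx : (pvDictFor l).contains x = true
      · have hxl : x ∈ l := by have := ih x; rw [hx] at this; exact of_decide_eq_true this.symm
        rw [if_pos hx, ih]
        by_cases hk : k ∈ l
        · simp [hk]
        · simp only [List.mem_append, List.mem_singleton]
          simp [hk]
          exact fun h => hk (h ▸ hxl)
      · rw [if_neg hx, PySem.Dict.contains_insert, ih]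
        by_cases hk : k = x <;> simp [hk]

lemma pvReps_append (l : List Int) (k : Int) :
    pvReps (l ++ [k]) = pvReps l ++ (if k ∈ l then [k] else []) := by
  unfold pvReps
  rw [PySem.List.enumerate_append, List.filter_append, List.map_append]
  congr 1
  · congr 1
    apply List.filter_congr
    intro p hp
    rcases (PySem.List.mem_enumerate_iff _ _ _).1 hp with ⟨j, hj, rfl⟩
    simp only [zero_add]
    have e1 : PySem.List.slice (l ++ [k]) none (some (j : Int)) = l.take j := by
      rw [PySem.List.slice_to (l ++ [k]) (Int.natCast_nonneg j)]
      simp [List.take_append_of_le_length (le_of_lt hj)]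
    have e2 : PySem.List.slice l none (some (j : Int)) = l.take j := by
      rw [PySem.List.slice_to l (Int.natCast_nonneg j)]; simp
    rw [e1, e2]
  · have h1 : PySem.List.enumerate [k] (0 + (l.length : Int)) = [((l.length : Int), k)] := by
      simp [PySem.List.enumerate]
    have h2 : PySem.List.slice (l ++ [k]) none (some (l.length : Int)) = l := by
      rw [PySem.List.slice_to (l ++ [k]) (Int.natCast_nonneg l.length)]
      simp [List.take_append_of_le_length (le_refl l.length)]
    rw [h1]
    by_cases hk : k ∈ l <;> simp [h2, hk]

lemma mem_pvReps (l : List Int) (x : Int) : x ∈ pvReps l ↔ 2 ≤ l.count x := by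
  induction l using List.reverseRecOn with
  | nil => simp [pvReps, PySem.List.enumerate]
  | append_singleton l k ih =>
      rw [pvReps_append, List.mem_append, ih, List.count_append]
      by_cases hxk : x = k
      · subst hxk
        by_cases hk : x ∈ l <;> simp_all [← List.count_pos_iff]
      · have h0 : [k].count x = 0 := List.count_eq_zero.2 (by simp [hxk])
        rw [h0]
        by_cases hk : k ∈ l <;> simp [hk, hxk]

lemma pvLoop (l : List Int) :
    l.foldl pvStepA (PySem.Dict.empty, PySem.Set.empty, PySem.Set.empty) =
      (pvDictFor l,
       (PySem.List.dedup l).filter (fun x => l.count x == 1),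
       PySem.Set.ofList (pvReps l)) := by
  induction l using List.reverseRecOn with
  | nil => rfl
  | append_singleton l k ih =>
      rw [List.foldl_append, ih, List.foldl_cons, List.foldl_nil]
      rw [pvReps_append, pvDictFor_append]
      unfold pvStepA
      simp only [contains_pvDictFor]
      by_cases hk : k ∈ l
      · simp only [hk, decide_true, if_true]
        simp only [Prod.mk.injEq]
        refine ⟨trivial, ?_, ?_⟩
        · -- eenmaal: discard k = filter with the new counts
          have hded : PySem.List.dedup (l ++ [k]) = PySem.List.dedup l := by
            simp only [PySem.List.dedup, PySem.Set.ofList_append_singleton]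
            exact PySem.Set.add_of_mem (by simpa [PySem.Set.mem_ofList] using hk)
          rw [hded]
          show List.filter _ (List.filter _ _) = _
          rw [List.filter_filter]

          apply List.filter_congr
          intro x hx
          have hxl : x ∈ l := (PySem.List.mem_dedup _ _).1 hx
          by_cases hxk : x = k
          · subst hxk
            have h1 : 1 ≤ l.count x := List.one_le_count_iff.2 hxl
            simp [List.count_append]
            omega
          · have hkx : ¬k = x := fun h => hxk h.symm
            simp [List.count_append, hxk, hkx]
        · -- meermaal: the new repeat occurrence appends
          rw [PySem.Set.ofList_append_singleton]
      · simp only [hk, decide_false, Bool.false_eq_true, if_false]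
        simp only [Prod.mk.injEq]
        refine ⟨trivial, ?_, ?_⟩
        · -- eenmaal: add of a fresh element appends
          have hknot : k ∉ (PySem.List.dedup l).filter (fun x => l.count x == 1) := by
            intro h
            exact hk ((PySem.List.mem_dedup _ _).1 (List.mem_of_mem_filter h))
          rw [PySem.Set.add_of_not_mem hknot]
          have hded : PySem.List.dedup (l ++ [k]) = PySem.List.dedup l ++ [k] := by
            simp only [PySem.List.dedup, PySem.Set.ofList_append_singleton]
            exact PySem.Set.add_of_not_mem (by simpa [PySem.Set.mem_ofList] using hk)
          rw [hded, List.filter_append]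
          congr 1
          · apply List.filter_congr
            intro x hx
            have hxl : x ∈ l := (PySem.List.mem_dedup _ _).1 hx
            have hxk : x ≠ k := fun h => hk (h ▸ hxl)
            have hkx : ¬k = x := fun h => hxk h.symm
            simp [List.count_append, hkx]
          · have h0 : l.count k = 0 := List.count_eq_zero.2 hk
            simp [List.count_append, h0]
        · simp

-- ===== VERDICT (by name: the statement is the Claim_ definition above) =====
theorem dubbels_spec : Claim_equal_dubbels := by
  intro lijst _
  unfold Spec_dubbels dubbels dubbels_alt
  rw [pvLoop]
  refine Prod.ext ?_ rfl
  show List.filter _ _ = PySem.Set.ofList _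
  have hnd : ((PySem.List.dedup lijst).filter
      (fun x => !(PySem.Set.contains (PySem.Set.ofList (pvReps lijst)) x))).Nodup :=
    (PySem.List.nodup_dedup lijst).filter _
  rw [PySem.Set.ofList_eq_self_of_nodup _ hnd]
  apply List.filter_congr
  intro x hx
  have hxl : x ∈ lijst := (PySem.List.mem_dedup _ _).1 hx
  have h1 : 1 ≤ lijst.count x := List.one_le_count_iff.2 hxl
  have hmem : (x ∈ PySem.Set.ofList (pvReps lijst)) ↔ 2 ≤ lijst.count x := by
    rw [PySem.Set.mem_ofList, mem_pvReps]
  by_cases h2 : 2 ≤ lijst.count x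
  · simp [hmem, h2]; omega
  · simp [hmem, h2]; omega
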